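-- pv_equiv track=rewrite | github.com/grahamwills/ZeeSheet2 | drawing/pathing.py | closed_shapes
-- ===== SOURCE A (Python) =====
-- from typing import Generator, Callable
--
-- def closed_shapes(coords: list[tuple]) -> Generator[list[tuple], None, None]:
--     """ Break coords into closed shapes """
--     n = len(coords)
--     first = 0
--     while first < n:
--         # fid the indices for the closed shape
--         last = first
--         while last < n and len(coords[last]) > 0:
--             last += 1
--         yield coords[first:last]
--         first = last + 1
-- ===== SOURCE B (Python) =====
-- def closed_shapes(coords):
--     """ Break coords into closed shapes """
--     current = []
--     for c in coords:
--         if len(c) == 0: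
--             yield current
--             current = []
--         else:
--             current.append(c)
--     if current:
--         yield current
-- ===== Notes on version B (the rewrite author's own statement) =====
-- stated objective: simpler
-- what changed: Replaced the index-based double while loop with nested-scan-and-slice by a single for-loop over the elements maintaining an accumulator that is emitted at each empty-tuple delimiter and once at the end if non-empty.
import Mathlib
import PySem

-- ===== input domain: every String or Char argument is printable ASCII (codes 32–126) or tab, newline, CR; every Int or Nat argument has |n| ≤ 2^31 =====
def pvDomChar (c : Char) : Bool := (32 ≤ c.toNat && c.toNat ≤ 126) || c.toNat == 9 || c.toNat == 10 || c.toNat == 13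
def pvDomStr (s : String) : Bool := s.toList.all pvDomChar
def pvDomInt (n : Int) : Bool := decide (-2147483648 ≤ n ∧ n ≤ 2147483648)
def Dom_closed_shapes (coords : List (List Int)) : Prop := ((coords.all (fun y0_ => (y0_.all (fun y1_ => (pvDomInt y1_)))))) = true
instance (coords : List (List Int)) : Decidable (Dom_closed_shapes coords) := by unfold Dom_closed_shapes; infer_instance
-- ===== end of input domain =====

-- B replaces A's index/slice double while loop by one element-wise pass with an accumulator (objective: simpler).

-- ===== PORT A =====
-- inner 'while last < n and len(coords[last]) > 0: last += 1'
-- (fuel = remaining iterations (n - last).toNat, a totality device only: it never runs out while the guard holds)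
def pvFindLastF (coords : List (List Int)) (n last : Int) (fuel : Nat) : Int :=
  match fuel with
  | 0 => last
  | fuel + 1 =>
    if last < n then
      if (PySem.List.pyGetD coords last []).length > 0 then
        pvFindLastF coords n (last + 1) fuel
      else last
    else last

def pvFindLast (coords : List (List Int)) (n last : Int) : Int :=
  pvFindLastF coords n last (n - last).toNat

-- outer 'while first < n: … yield coords[first:last]; first = last + 1'
def pvOuterF (coords : List (List Int)) (n first : Int) (fuel : Nat) : List (List (List Int)) :=
  match fuel with
  | 0 => []
  | fuel + 1 =>
    if first < n then
      PySem.List.slice coords (some first) (some (pvFindLast coords n first)) ::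
        pvOuterF coords n (pvFindLast coords n first + 1) fuel
    else []

def closed_shapes (coords : List (List Int)) : List (List (List Int)) :=
  pvOuterF coords coords.length 0 (coords.length)

-- ===== PORT B =====
-- 'for c in coords: if len(c)==0: yield current; current=[] else: current.append(c)'; then 'if current: yield current'
def pvGoB (coords : List (List Int)) (current : List (List Int)) : List (List (List Int)) :=
  match coords with
  | [] => if current.isEmpty then [] else [current]
  | c :: rest =>
      if c.length = 0 then current :: pvGoB rest []
      else pvGoB rest (current ++ [c])

def closed_shapes_alt (coords : List (List Int)) : List (List (List Int)) :=
  pvGoB coords []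

-- ===== PRECONDITION & SPEC =====
def Spec_closed_shapes (coords : List (List Int)) (out : List (List (List Int))) : Prop := out = closed_shapes_alt coords
instance (coords : List (List Int)) (out : List (List (List Int))) : Decidable (Spec_closed_shapes coords out) := by unfold Spec_closed_shapes; infer_instance

-- ===== CLAIM (what is proved, stated in full; the proofs are below) =====
def Claim_equal_closed_shapes : Prop := ∀ (coords : List (List Int)), Dom_closed_shapes coords → Spec_closed_shapes coords (closed_shapes coords)

-- ===== LEMMAS AND PROOFS =====

def pvP (c : List Int) : Bool := !c.isEmpty

theorem pvGoB_acc (l : List (List Int)) (acc : List (List Int)) :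
    pvGoB l acc =
      match l.dropWhile pvP with
      | [] => if (acc ++ l.takeWhile pvP).isEmpty then [] else [acc ++ l.takeWhile pvP]
      | _ :: t => (acc ++ l.takeWhile pvP) :: pvGoB t [] := by
  induction l generalizing acc with
  | nil => simp [pvGoB]
  | cons c rest ih =>
    by_cases h : c.length = 0
    · have hc : c = [] := List.length_eq_zero_iff.mp h
      simp [pvGoB, pvP, hc]
    · have hp : pvP c = true := by
        simp [pvP]
        exact List.length_pos_iff.mp (Nat.pos_of_ne_zero h)
      simp only [pvGoB, if_neg h]
      rw [ih]
      simp [hp]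

theorem pv_take_takeWhile (p : List Int → Bool) (l : List (List Int)) :
    l.take (l.takeWhile p).length = l.takeWhile p := by
  induction l with
  | nil => simp
  | cons c rest ih => by_cases h : p c <;> simp [h, ih]

theorem pv_drop_takeWhile (p : List Int → Bool) (l : List (List Int)) :
    l.drop (l.takeWhile p).length = l.dropWhile p := by
  induction l with
  | nil => simp
  | cons c rest ih => by_cases h : p c <;> simp [h, ih]

theorem pvFindLastF_eq (coords : List (List Int)) (fuel : Nat) :
    ∀ last : Int, 0 ≤ last → last ≤ coords.length →
      ((coords.length : Int) - last).toNat ≤ fuel →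
      pvFindLastF coords coords.length last fuel
        = last + ((coords.drop last.toNat).takeWhile pvP).length := by
  induction fuel with
  | zero =>
    intro last h0 hle hf
    have hl : last.toNat = coords.length := by omega
    simp [pvFindLastF, hl]
  | succ fuel ih =>
    intro last h0 hle hf
    simp only [pvFindLastF]
    split
    · rename_i hlt
      have hnat : last.toNat < coords.length := by omega
      have hget : PySem.List.pyGetD coords last [] = coords[last.toNat] :=
        PySem.List.pyGetD_eq_getElem coords [] h0 hlt
      have hdrop : coords.drop last.toNat
          = coords[last.toNat] :: coords.drop (last.toNat + 1) :=
        List.drop_eq_getElem_cons hnat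
      split
      · rename_i hlen
        rw [hget] at hlen
        have hp : pvP coords[last.toNat] = true := by
          simp [pvP]
          exact List.length_pos_iff.mp hlen
        have ihr := ih (last + 1) (by omega) (by omega) (by omega)
        have ht : (last + 1).toNat = last.toNat + 1 := by omega
        rw [ihr, hdrop, List.takeWhile_cons, hp, ht]
        simp
        omega
      · rename_i hlen
        rw [hget] at hlen
        have hc : coords[last.toNat] = [] := List.length_eq_zero_iff.mp (by omega)
        have hp : pvP coords[last.toNat] = false := by simp [pvP, hc]
        rw [hdrop, List.takeWhile_cons, hp]
        simp
    · rename_i hlt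
      have : last.toNat = coords.length := by omega
      rw [this]
      simp

theorem pvOuterF_eq (coords : List (List Int)) (fuel : Nat) :
    ∀ first : Int, 0 ≤ first → ((coords.length : Int) - first).toNat ≤ fuel →
      pvOuterF coords coords.length first fuel = pvGoB (coords.drop first.toNat) [] := by
  induction fuel with
  | zero =>
    intro first h0 hf
    have hge : coords.length ≤ first.toNat := by omega
    rw [List.drop_eq_nil_of_le hge]
    simp [pvOuterF, pvGoB]
  | succ fuel ih =>
    intro first h0 hf
    simp only [pvOuterF]
    split
    · rename_i hflt
      generalize hldef : coords.drop first.toNat = l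
      have hlen : l.length = coords.length - first.toNat := by
        rw [← hldef]; simp
      have hlne : l ≠ [] := by
        intro h
        rw [h] at hlen; simp at hlen; omega
      have hkle : (l.takeWhile pvP).length ≤ l.length := by
        have := congrArg List.length (pv_take_takeWhile pvP l)
        simpa using this.symm.le.trans (by simp)
      set k := (l.takeWhile pvP).length with hk
      have hfl : pvFindLast coords coords.length first = first + k := by
        rw [pvFindLast, pvFindLastF_eq coords _ first h0 (by omega) (by omega), hldef]
      have hslice : PySem.List.slice coords (some first) (some (first + (k : Int)))
          = l.takeWhile pvP := by
        rw [PySem.List.slice_toNat coords h0 (by omega)]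
        have h2 : (first + (k : Int)).toNat - first.toNat = k := by omega
        rw [h2, hldef, hk, pv_take_takeWhile]
      have hdrop1 : coords.drop (first + (k : Int) + 1).toNat = (l.dropWhile pvP).drop 1 := by
        have h1 : (first + (k : Int) + 1).toNat = first.toNat + (k + 1) := by omega
        rw [h1, ← List.drop_drop, hldef, ← List.drop_drop, hk, pv_drop_takeWhile]
      rw [hfl, hslice]
      rw [pvGoB_acc l []]
      cases hdw : l.dropWhile pvP with
      | nil =>
        have hkl : k = l.length := by
          have := congrArg List.length (List.takeWhile_append_dropWhile (p := pvP) (l := l))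
          rw [hdw] at this; simp at this; omega
        have hstop : ¬ (first + (k : Int) + 1 < (coords.length : Int)) := by omega
        have hz : pvOuterF coords coords.length (first + (k : Int) + 1) fuel = [] := by
          cases fuel <;> simp [pvOuterF, hstop]
        rw [hz]
        have htw : l.takeWhile pvP = l := by
          have := List.takeWhile_append_dropWhile (p := pvP) (l := l)
          rw [hdw] at this; simpa using this
        simp [htw, List.isEmpty_iff, hlne]
      | cons d t =>
        have hrec := ih (first + (k : Int) + 1) (by omega) (by omega)
        rw [hrec, hdrop1, hdw]
        simp
    · rename_i hflt
      have hge : coords.length ≤ first.toNat := by omega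
      rw [List.drop_eq_nil_of_le hge]
      simp [pvGoB]

theorem closed_shapes_spec : Claim_equal_closed_shapes := by
  intro coords _
  unfold Spec_closed_shapes closed_shapes closed_shapes_alt
  have := pvOuterF_eq coords coords.length 0 (by omega) (by omega)
  simpa using this
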